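-- pv_equiv track=rewrite | github.com/ArtsiomSt/PictureCleanerDocker | cleanerapi/picturerecAPI/functions_for_images/funcs_for_rec.py | sort_letters_by
-- ===== SOURCE A (Python) =====
-- def sort_letters_by(letters):
--     max_line_element = max(letters, key=lambda x: x[3])
--     max_line = max_line_element[3] + 1
--     line = 0
--     new_letters = []
--     while (line < max_line):
--         part_of_letters = list(filter(lambda x: x[3] == line, letters))
--         part_of_letters.sort(key=lambda x: x[0])
--         part_of_letters.append((1, 1, "\n", 1))
--         new_letters = part_of_letters + new_letters
--         line += 1
--     return new_letters
-- ===== SOURCE B (Python) =====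
-- def sort_letters_by(letters):
--     ordered = sorted(letters, key=lambda l: (-l[3], l[0]))
--     out = []
--     i = 0
--     for line in range(ordered[0][3], -1, -1):
--         while i < len(ordered) and ordered[i][3] == line:
--             out.append(ordered[i])
--             i += 1
--         out.append((1, 1, "\n", 1))
--     return out
-- ===== Notes on version B (the rewrite author's own statement) =====
-- stated objective: faster
-- what changed: Replaces A's per-line filter-and-sort rescans of the whole input with ONE global stable sort by the tuple key (-line, x) followed by a single pointer scan that slices the sorted list into lines from the top line down.
import Mathlib
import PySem

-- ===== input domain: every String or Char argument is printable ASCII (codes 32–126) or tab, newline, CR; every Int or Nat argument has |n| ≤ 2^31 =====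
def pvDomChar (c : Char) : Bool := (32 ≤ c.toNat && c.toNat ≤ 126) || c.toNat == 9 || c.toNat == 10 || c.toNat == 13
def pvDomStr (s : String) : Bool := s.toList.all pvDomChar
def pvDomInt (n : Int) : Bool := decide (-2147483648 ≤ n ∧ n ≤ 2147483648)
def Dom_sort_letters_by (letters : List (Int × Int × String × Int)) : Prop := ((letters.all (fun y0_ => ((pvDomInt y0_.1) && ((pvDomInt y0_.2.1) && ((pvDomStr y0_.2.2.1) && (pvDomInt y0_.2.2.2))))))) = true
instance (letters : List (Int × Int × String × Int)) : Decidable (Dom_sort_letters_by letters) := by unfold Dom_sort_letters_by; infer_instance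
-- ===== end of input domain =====

-- B replaces A's per-line filter-and-sort rescans with one global stable sort by (-line, x)
-- plus a single pointer scan slicing out the lines from the top down (objective: faster).

-- ===== PORT A =====
-- A: max(letters, key=x[3]); while line < max_line: filter the whole list for that line,
-- sort it by x[0], append the newline sentinel, PREPEND to the accumulator.
def sort_letters_by (letters : List (Int × Int × String × Int)) : List (Int × Int × String × Int) :=
  match PySem.List.max? letters (fun x => x.2.2.2) with
  | none => []  -- Python raises ValueError here (empty list); excluded by Pre_
  | some max_line_element =>
    let max_line : Int := max_line_element.2.2.2 + 1
    -- 'line = 0; while line < max_line: …; line += 1' over accumulator new_letters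
    (PySem.List.pyRange 0 max_line 1).foldl
      (fun new_letters line =>
        (PySem.List.sorted (letters.filter (fun x => x.2.2.2 == line)) (fun x => x.1) false
          ++ [((1 : Int), (1 : Int), "\n", (1 : Int))]) ++ new_letters)
      []

-- ===== PORT B =====
-- B: one stable sort of the whole list by the tuple key (-l[3], l[0]) (PySem.List.sorted2),
-- then 'for line in range(ordered[0][3], -1, -1)' with the inner pointer-advancing while
-- loop ported as the recursion pvWhileB.
def pvWhileB (ordered : List (Int × Int × String × Int)) (line : Int)
    (out : List (Int × Int × String × Int)) (i : Nat) :
    List (Int × Int × String × Int) × Nat :=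
  -- 'while i < len(ordered) and ordered[i][3] == line: out.append(ordered[i]); i += 1'
  if h : i < ordered.length then
    if (ordered[i]'h).2.2.2 == line then
      pvWhileB ordered line (out ++ [ordered[i]'h]) (i + 1)
    else (out, i)
  else (out, i)
termination_by ordered.length - i

def sort_letters_by_alt (letters : List (Int × Int × String × Int)) : List (Int × Int × String × Int) :=
  let ordered := PySem.List.sorted2 letters (fun l => -l.2.2.2) (fun l => l.1) false
  match PySem.List.pyGet? ordered 0 with
  | none => []  -- Python raises IndexError here (ordered[0] of the empty list); excluded by Pre_
  | some first =>
    ((PySem.List.pyRange first.2.2.2 (-1) (-1)).foldl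
       (fun st line =>
         let r := pvWhileB ordered line st.1 st.2
         (r.1 ++ [((1 : Int), (1 : Int), "\n", (1 : Int))], r.2))
       ([], 0)).1

-- ===== PRECONDITION & SPEC =====
-- Pre_ excludes only the empty list, on which A raises ValueError (max of empty sequence)
-- and B raises IndexError (ordered[0]).
def Pre_sort_letters_by (letters : List (Int × Int × String × Int)) : Prop := letters ≠ []
instance (letters : List (Int × Int × String × Int)) : Decidable (Pre_sort_letters_by letters) := by unfold Pre_sort_letters_by; infer_instance
def pvWitness_sort_letters_by : (List (Int × Int × String × Int)) := [(3, 0, "a", 1), (1, 0, "b", 0)]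

def Spec_sort_letters_by (letters : List (Int × Int × String × Int)) (out : List (Int × Int × String × Int)) : Prop := out = sort_letters_by_alt letters
instance (letters : List (Int × Int × String × Int)) (out : List (Int × Int × String × Int)) : Decidable (Spec_sort_letters_by letters out) := by unfold Spec_sort_letters_by; infer_instance

-- ===== CLAIM (what is proved, stated in full; the proofs are below) =====
def Claim_equal_sort_letters_by : Prop := ∀ (letters : List (Int × Int × String × Int)), Dom_sort_letters_by letters → Pre_sort_letters_by letters → Spec_sort_letters_by letters (sort_letters_by letters)

-- ===== LEMMAS AND PROOFS =====

-- The lexicographic 'before' test sorted2 uses for key (-l[3], l[0]).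
def pvLt (a b : Int × Int × String × Int) : Bool :=
  decide (-a.2.2.2 < -b.2.2.2) || (!decide (-b.2.2.2 < -a.2.2.2) && decide (a.1 < b.1))

-- The 'before' test A's per-line sorted uses for key l[0].
def pvLtc (a b : Int × Int × String × Int) : Bool := decide (a.1 < b.1)

theorem pvLt_iff (a b : Int × Int × String × Int) :
    pvLt a b = true ↔ (b.2.2.2 < a.2.2.2 ∨ (a.2.2.2 = b.2.2.2 ∧ a.1 < b.1)) := by
  simp [pvLt]; omega

theorem pvSortedLine (letters : List (Int × Int × String × Int)) (key : _) (hk : key = fun x : Int × Int × String × Int => x.1) :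
    PySem.List.sorted letters key false = letters.foldl (fun acc x => PySem.List.insertBy pvLtc x acc) [] := by
  subst hk; rfl

theorem pvSorted2_eq (letters : List (Int × Int × String × Int)) :
    PySem.List.sorted2 letters (fun l => -l.2.2.2) (fun l => l.1) false
      = letters.foldl (fun acc x => PySem.List.insertBy pvLt x acc) [] := rfl

theorem pvLt_false_iff (a b : Int × Int × String × Int) :
    pvLt a b = false ↔ ¬ (b.2.2.2 < a.2.2.2 ∨ (a.2.2.2 = b.2.2.2 ∧ a.1 < b.1)) := by
  rw [← pvLt_iff]; simp

-- x strictly before y, y not after z ⇒ x strictly before z (lex on (-line, x0))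
theorem pvLt_lt_le_trans {x y z : Int × Int × String × Int}
    (h1 : pvLt x y = true) (h2 : pvLt z y = false) : pvLt x z = true := by
  rw [pvLt_iff] at h1 ⊢; rw [pvLt_false_iff] at h2; omega

theorem pvLt_asymm_le_trans {x y z : Int × Int × String × Int}
    (h1 : pvLt x y = true) (h2 : pvLt z y = false) : pvLt z x = false := by
  rw [pvLt_iff] at h1; rw [pvLt_false_iff] at h2 ⊢; omega

theorem pvLt_asymm {x y : Int × Int × String × Int} (h : pvLt x y = true) :
    pvLt y x = false := by
  rw [pvLt_iff] at h; rw [pvLt_false_iff]; omega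

-- on a common line the two 'before' tests agree
theorem pvLtc_eq_pvLt_of_eq {x z : Int × Int × String × Int} (h : x.2.2.2 = z.2.2.2) :
    pvLtc x z = pvLt x z := by
  simp [pvLt, pvLtc, h]

theorem pvInsertBy_pairwise (x : Int × Int × String × Int) (ys : List (Int × Int × String × Int))
    (h : ys.Pairwise (fun a b => pvLt b a = false)) :
    (PySem.List.insertBy pvLt x ys).Pairwise (fun a b => pvLt b a = false) := by
  induction ys with
  | nil => simp [PySem.List.insertBy]
  | cons y ys ih =>
    rcases List.pairwise_cons.mp h with ⟨hy, hys⟩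
    by_cases hxy : pvLt x y = true
    · rw [show PySem.List.insertBy pvLt x (y :: ys) = x :: y :: ys by
        simp [PySem.List.insertBy, hxy]]
      refine List.pairwise_cons.mpr ⟨?_, h⟩
      intro z hz
      rcases List.mem_cons.mp hz with rfl | hz
      · exact pvLt_asymm hxy
      · exact pvLt_asymm_le_trans hxy (hy z hz)
    · rw [show PySem.List.insertBy pvLt x (y :: ys) = y :: PySem.List.insertBy pvLt x ys by
        simp [PySem.List.insertBy, hxy]]
      refine List.pairwise_cons.mpr ⟨?_, ih hys⟩
      intro z hz
      rcases (PySem.List.mem_insertBy _ _ _ _).mp hz with rfl | hz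
      · exact Bool.not_eq_true _ ▸ hxy
      · exact hy z hz

theorem pvFilter_insertBy (c : Int) (x : Int × Int × String × Int) (ys : List (Int × Int × String × Int))
    (h : ys.Pairwise (fun a b => pvLt b a = false)) :
    (PySem.List.insertBy pvLt x ys).filter (fun y => y.2.2.2 == c)
      = if x.2.2.2 == c then PySem.List.insertBy pvLtc x (ys.filter (fun y => y.2.2.2 == c))
        else ys.filter (fun y => y.2.2.2 == c) := by
  induction ys with
  | nil =>
    by_cases hx : (x.2.2.2 == c) = true <;> simp [PySem.List.insertBy, hx]
  | cons y ys ih =>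
    rcases List.pairwise_cons.mp h with ⟨hy, hys⟩
    by_cases hxy : pvLt x y = true
    · rw [show PySem.List.insertBy pvLt x (y :: ys) = x :: y :: ys by
        simp [PySem.List.insertBy, hxy]]
      by_cases hx : (x.2.2.2 == c) = true
      · rw [if_pos hx]
        rw [show List.filter (fun y => y.2.2.2 == c) (x :: y :: ys)
            = x :: List.filter (fun y => y.2.2.2 == c) (y :: ys) from by simp [hx]]
        cases hf : (y :: ys).filter (fun y => y.2.2.2 == c) with
        | nil => simp [PySem.List.insertBy]
        | cons z zs =>
          have hzmem : z ∈ (y :: ys).filter (fun y => y.2.2.2 == c) := by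
            rw [hf]; exact List.mem_cons_self
          have hzc : z.2.2.2 = c := by
            have := (List.mem_filter.mp hzmem).2; simpa using this
          have hzin : z ∈ y :: ys := (List.mem_filter.mp hzmem).1
          have hxz : pvLt x z = true := by
            rcases List.mem_cons.mp hzin with rfl | hzin
            · exact hxy
            · exact pvLt_lt_le_trans hxy (hy z hzin)
          have hltc : pvLtc x z = true := by
            rw [pvLtc_eq_pvLt_of_eq (by simp_all : x.2.2.2 = z.2.2.2)]; exact hxz
          simp [PySem.List.insertBy, hltc]
      · rw [if_neg hx, show List.filter (fun y => y.2.2.2 == c) (x :: y :: ys)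
            = List.filter (fun y => y.2.2.2 == c) (y :: ys) from by simp [hx]]
    · rw [show PySem.List.insertBy pvLt x (y :: ys) = y :: PySem.List.insertBy pvLt x ys by
        simp [PySem.List.insertBy, hxy]]
      simp only [List.filter_cons, ih hys]
      by_cases hx : (x.2.2.2 == c) = true
      · by_cases hyc : (y.2.2.2 == c) = true
        · have hltc : pvLtc x y = false := by
            rw [pvLtc_eq_pvLt_of_eq (by simp_all : x.2.2.2 = y.2.2.2)]
            exact Bool.not_eq_true _ ▸ hxy
          simp [hx, hyc, PySem.List.insertBy, hltc]
        · simp [hx, hyc]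
      · simp [hx]

theorem pvFoldl_pairwise (xs acc : List (Int × Int × String × Int))
    (h : acc.Pairwise (fun a b => pvLt b a = false)) :
    (xs.foldl (fun acc x => PySem.List.insertBy pvLt x acc) acc).Pairwise (fun a b => pvLt b a = false) := by
  induction xs generalizing acc with
  | nil => exact h
  | cons x xs ih => exact ih _ (pvInsertBy_pairwise x acc h)

theorem pvSortedFilter (letters : List (Int × Int × String × Int)) (c : Int) :
    (PySem.List.sorted2 letters (fun l => -l.2.2.2) (fun l => l.1) false).filter (fun y => y.2.2.2 == c)
      = PySem.List.sorted (letters.filter (fun y => y.2.2.2 == c)) (fun x => x.1) false := by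
  rw [pvSorted2_eq, pvSortedLine _ _ rfl]
  suffices h : ∀ (xs acc : List (Int × Int × String × Int)),
      acc.Pairwise (fun a b => pvLt b a = false) →
      (xs.foldl (fun acc x => PySem.List.insertBy pvLt x acc) acc).filter (fun y => y.2.2.2 == c)
        = (xs.filter (fun y => y.2.2.2 == c)).foldl (fun acc x => PySem.List.insertBy pvLtc x acc)
            (acc.filter (fun y => y.2.2.2 == c)) by
    simpa using h letters [] (by simp)
  intro xs
  induction xs with
  | nil => intro acc _; simp
  | cons x xs ih =>
    intro acc hacc
    simp only [List.foldl_cons, List.filter_cons]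
    by_cases hx : x.2.2.2 == c
    · simp only [hx, if_pos trivial, List.foldl_cons]
      rw [ih _ (pvInsertBy_pairwise x acc hacc), pvFilter_insertBy c x acc hacc, if_pos hx]
    · rw [ih _ (pvInsertBy_pairwise x acc hacc), pvFilter_insertBy c x acc hacc, if_neg (by simp_all)]
      simp [hx]

-- pointer while-loop: it appends exactly the run of equal-line elements at the pointer
theorem pvWhileB_spec (ordered : List (Int × Int × String × Int)) (line : Int)
    (out : List (Int × Int × String × Int)) (i : Nat) :
    pvWhileB ordered line out i
      = (out ++ (ordered.drop i).takeWhile (fun y => y.2.2.2 == line),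
         i + ((ordered.drop i).takeWhile (fun y => y.2.2.2 == line)).length) := by
  fun_induction pvWhileB ordered line out i with
  | case1 out i h hline ih =>
    rw [ih, List.drop_eq_getElem_cons h, List.takeWhile_cons, if_pos hline]
    simp; omega
  | case2 out i h hline =>
    rw [List.drop_eq_getElem_cons h, List.takeWhile_cons, if_neg hline]
    simp
  | case3 out i h =>
    rw [List.drop_of_length_le (by omega)]
    simp

-- on a line-descending list bounded by c, the run for line c is the whole filter for c
theorem pvTakeWhile_filter (c : Int) (s : List (Int × Int × String × Int))
    (hdesc : s.Pairwise (fun a b => b.2.2.2 ≤ a.2.2.2)) (hle : ∀ y ∈ s, y.2.2.2 ≤ c) :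
    s.takeWhile (fun y => y.2.2.2 == c) = s.filter (fun y => y.2.2.2 == c)
      ∧ ∀ y ∈ s.dropWhile (fun y => y.2.2.2 == c), y.2.2.2 < c := by
  induction s with
  | nil => simp
  | cons y s ih =>
    rcases List.pairwise_cons.mp hdesc with ⟨hy, hs⟩
    by_cases hyc : (y.2.2.2 == c) = true
    · rw [List.takeWhile_cons, if_pos hyc, List.dropWhile_cons, if_pos hyc,
        show List.filter (fun y => y.2.2.2 == c) (y :: s)
          = y :: List.filter (fun y => y.2.2.2 == c) s from by simp [hyc]]
      obtain ⟨h1, h2⟩ := ih hs (fun z hz => hle z (List.mem_cons_of_mem y hz))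
      exact ⟨by rw [h1], h2⟩
    · have hylt : y.2.2.2 < c := by
        have h1 := hle y List.mem_cons_self
        have h2 : ¬ y.2.2.2 = c := by simpa using hyc
        omega
      rw [List.takeWhile_cons, if_neg hyc, List.dropWhile_cons, if_neg hyc]
      refine ⟨?_, ?_⟩
      · rw [eq_comm, List.filter_eq_nil_iff]
        intro z hz
        rcases List.mem_cons.mp hz with rfl | hz
        · simpa using hyc
        · have := hy z hz
          simp; omega
      · intro z hz
        rcases List.mem_cons.mp hz with rfl | hz
        · exact hylt
        · have := hy z hz; omega

theorem pvScan (ordered : List (Int × Int × String × Int)) (c : Int)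
    (pre suf out : List (Int × Int × String × Int)) (i : Nat)
    (hsplit : ordered = pre ++ suf) (hi : i = pre.length)
    (hdesc : suf.Pairwise (fun a b => b.2.2.2 ≤ a.2.2.2))
    (hle : ∀ y ∈ suf, y.2.2.2 ≤ c) :
    ((PySem.List.pyRange c (-1) (-1)).foldl
       (fun st line =>
         let r := pvWhileB ordered line st.1 st.2
         (r.1 ++ [((1 : Int), (1 : Int), "\n", (1 : Int))], r.2))
       (out, i)).1
      = out ++ (PySem.List.pyRange c (-1) (-1)).flatMap
          (fun l => suf.filter (fun y => y.2.2.2 == l) ++ [((1 : Int), (1 : Int), "\n", (1 : Int))]) := by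
  by_cases hneg : c < 0
  · rw [PySem.List.pyRange_neg_one_eq_nil (by omega)]; simp
  · rw [PySem.List.pyRange_neg_one_cons (by omega : (-1 : Int) < c)]
    simp only [List.foldl_cons, List.flatMap_cons]
    rw [pvWhileB_spec]
    have hdrop : ordered.drop i = suf := by
      rw [hsplit, hi, List.drop_left]
    rw [hdrop]
    obtain ⟨htw, hdw⟩ := pvTakeWhile_filter c suf hdesc hle
    have hsuf : suf = suf.takeWhile (fun y => y.2.2.2 == c)
        ++ suf.dropWhile (fun y => y.2.2.2 == c) := (List.takeWhile_append_dropWhile).symm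
    have hrec := pvScan ordered (c - 1)
      (pre ++ suf.takeWhile (fun y => y.2.2.2 == c))
      (suf.dropWhile (fun y => y.2.2.2 == c))
      (out ++ suf.takeWhile (fun y => y.2.2.2 == c) ++ [((1 : Int), (1 : Int), "\n", (1 : Int))])
      (i + (suf.takeWhile (fun y => y.2.2.2 == c)).length)
      (by rw [hsplit, List.append_assoc]; exact congrArg _ hsuf)
      (by simp [hi])
      (List.Pairwise.sublist (List.dropWhile_sublist _) hdesc)
      (fun y hy => by have := hdw y hy; omega)
    rw [hrec, htw]
    have hline : ∀ l ∈ PySem.List.pyRange (c - 1) (-1) (-1),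
        (suf.dropWhile (fun y => y.2.2.2 == c)).filter (fun y => y.2.2.2 == l)
          = suf.filter (fun y => y.2.2.2 == l) := by
      intro l hl
      have hlc : l < c := by
        have := (PySem.List.mem_pyRange_neg_one (a := c - 1) (b := -1) (x := l)).mp hl
        omega
      conv_rhs => rw [hsuf, List.filter_append]
      rw [show (suf.takeWhile (fun y => y.2.2.2 == c)).filter (fun y => y.2.2.2 == l) = [] from ?_,
        List.nil_append]
      rw [List.filter_eq_nil_iff]
      intro z hz
      have hzc : (fun y : Int × Int × String × Int => y.2.2.2 == c) z = true :=
        List.mem_takeWhile_imp (p := fun y : Int × Int × String × Int => y.2.2.2 == c) hz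
      simp at hzc ⊢
      omega
    have hfl : (PySem.List.pyRange (c - 1) (-1) (-1)).flatMap
          (fun l => (suf.dropWhile (fun y => y.2.2.2 == c)).filter (fun y => y.2.2.2 == l)
            ++ [((1 : Int), (1 : Int), "\n", (1 : Int))])
        = (PySem.List.pyRange (c - 1) (-1) (-1)).flatMap
          (fun l => suf.filter (fun y => y.2.2.2 == l)
            ++ [((1 : Int), (1 : Int), "\n", (1 : Int))]) := by
      apply List.flatMap_congr
      intro l hl
      rw [hline l hl]
    rw [hfl]
    simp [List.append_assoc]
termination_by (c + 1).toNat
decreasing_by omega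

-- A's prepend loop produces the reverse-order concatenation of the blocks.
theorem pvFoldlPrepend {α β : Type} (l : List β) (g : β → List α) (init : List α) :
    l.foldl (fun acc x => g x ++ acc) init = l.reverse.flatMap g ++ init := by
  induction l generalizing init with
  | nil => simp
  | cons x t ih => simp [ih, List.append_assoc]

theorem sort_letters_by_eq_alt (letters : List (Int × Int × String × Int))
    (h : letters ≠ []) : sort_letters_by letters = sort_letters_by_alt letters := by
  unfold sort_letters_by sort_letters_by_alt
  cases hm : PySem.List.max? letters (fun x => x.2.2.2) with
  | none => exact absurd ((PySem.List.max?_eq_none_iff _ _).mp hm) h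
  | some m =>
    have hperm : (PySem.List.sorted2 letters (fun l => -l.2.2.2) (fun l => l.1) false).Perm letters :=
      PySem.List.sorted2_perm _ _ _ _
    cases hord : PySem.List.sorted2 letters (fun l => -l.2.2.2) (fun l => l.1) false with
    | nil => exact absurd (List.perm_nil.mp (hord ▸ hperm.symm)) h
    | cons hd tl =>
      have hpermc : (hd :: tl).Perm letters := hord ▸ hperm
      have hpair : (hd :: tl).Pairwise (fun a b => pvLt b a = false) := by
        rw [← hord, pvSorted2_eq]
        exact pvFoldl_pairwise letters [] (by simp)
      have hdesc : (hd :: tl).Pairwise (fun a b => b.2.2.2 ≤ a.2.2.2) := by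
        refine hpair.imp ?_
        intro a b hab
        rw [pvLt_false_iff] at hab; omega
      have hle : ∀ y ∈ hd :: tl, y.2.2.2 ≤ hd.2.2.2 := by
        intro y hy
        rcases List.mem_cons.mp hy with rfl | hy
        · omega
        · exact (List.pairwise_cons.mp hdesc).1 y hy
      have hm3 : m.2.2.2 = hd.2.2.2 := by
        have h1 : hd.2.2.2 ≤ m.2.2.2 :=
          PySem.List.max?_isMax hm hd (hpermc.subset List.mem_cons_self)
        have h2 : m.2.2.2 ≤ hd.2.2.2 :=
          hle m (hpermc.symm.subset (PySem.List.max?_mem hm))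
        omega
      have hget : PySem.List.pyGet? (hd :: tl) (0 : Int) = some hd := by
        simp [pysem]
      have hscan := pvScan (hd :: tl) hd.2.2.2 [] (hd :: tl) [] 0 rfl rfl hdesc hle
      simp only [hget] at hscan ⊢
      rw [hscan, pvFoldlPrepend]
      simp only [List.append_nil, List.nil_append]
      have hrev : (PySem.List.pyRange 0 (m.2.2.2 + 1) 1).reverse
          = PySem.List.pyRange m.2.2.2 (-1) (-1) := by
        have := PySem.List.pyRange_neg_one_eq_reverse (a := m.2.2.2) (b := -1)
        norm_num at this
        rw [this]
      rw [hrev, hm3]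
      apply List.flatMap_congr
      intro l _
      rw [show (hd :: tl).filter (fun y => y.2.2.2 == l)
            = (PySem.List.sorted2 letters (fun l => -l.2.2.2) (fun l => l.1) false).filter
                (fun y => y.2.2.2 == l) from by rw [hord],
        pvSortedFilter]

-- ===== VERDICT (by name: the statement is the Claim_ definition above) =====
theorem sort_letters_by_spec : Claim_equal_sort_letters_by := by
  intro letters _ hpre
  unfold Spec_sort_letters_by
  exact sort_letters_by_eq_alt letters hpre
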